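-- pv_equiv track=rewrite | github.com/moemode/algs | mit-6006/problem_sets/ps1/ps2/satisfying_booking.py | satisfying_booking
-- ===== SOURCE A (Python) =====
-- from typing import Iterable
-- from dataclasses import dataclass
--
-- @dataclass
-- class Item:
--     value: int
--     count: int
--
-- @dataclass
-- class Booking:
--     start: int
--     end: int
--     n_rooms: int
--
-- def negate_counts(numbers: list[Item]):
--     for item in numbers:
--         item.count = -item.count
--     return numbers
--
-- def satisfying_booking(
--     talk_requests: list[tuple[int, int]]
-- ) -> tuple[tuple[int, int, int], ...]:
--     """
--     Input:  R | Tuple of |R| talk request tuples (s, t)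
--     Output: B | Tuple of room booking triples (k, s, t)
--               | that is the booking schedule that satisfies R
--     """
--     if not talk_requests:
--         return ()
--     start_times = map(lambda t: t[0], talk_requests)
--     end_times = map(lambda t: t[1], talk_requests)
--     start_time_counts = get_counts(sorted(start_times))
--     end_time_counts = negate_counts(get_counts(sorted(end_times)))
--     largest_end_time = end_time_counts[-1].value
--     schedule = [Booking(start_time_counts[0].value, -1, start_time_counts[0].count)]
--     # index of next start time to be processed
--     s = 1
--     # index of next end time to be processed
--     e = 0
--     while s < len(start_time_counts) or e < len(end_time_counts):
--         current_booking = schedule[-1]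
--         next_start = (
--             start_time_counts[s]
--             if s < len(start_time_counts)
--             else Item(largest_end_time + 1, 0)
--         )
--         next_end = end_time_counts[e]
--         if next_start.value == next_end.value:
--             d = next_start.count + next_end.count
--             s += 1
--             e += 1
--         elif next_start.value < next_end.value:
--             d = next_start.count
--             s += 1
--         else:
--             d = next_end.count
--             e += 1
--         if d != 0:
--             next_change = min(next_start.value, next_end.value)
--             n_rooms = current_booking.n_rooms + d
--             current_booking.end = next_change
--             if next_change != largest_end_time:
--                 schedule.append(Booking(next_change, -1, n_rooms))
--     return tuple(
--         map(lambda booking: (booking.n_rooms, booking.start, booking.end), schedule)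
--     )
--
-- def get_counts(sorted_numbers: Iterable[int]) -> list[Item]:
--     if not sorted_numbers:
--         return []
--     sorted_numbers = sorted_numbers.__iter__()
--     counts = [Item(next(sorted_numbers), 1)]
--     for n in sorted_numbers:
--         prev = counts[-1]
--         if n != prev.value:
--             counts.append(Item(n, 1))
--         else:
--             prev.count += 1
--     return counts
-- ===== SOURCE B (Python) =====
-- # Simpler re-implementation: one delta dict per time + a single sorted sweep,
-- # instead of run-length-encoding two sorted lists and merging with two pointers.
-- def satisfying_booking(talk_requests):
--     if not talk_requests:
--         return ()
--     starts = [s for s, _ in talk_requests]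
--     ends = [t for _, t in talk_requests]
--     s0 = min(starts)
--     k0 = starts.count(s0)
--     largest_end = max(ends)
--     delta = {}
--     for t in starts:
--         if t != s0:
--             delta[t] = delta.get(t, 0) + 1
--     for t in ends:
--         delta[t] = delta.get(t, 0) - 1
--     rooms = k0
--     schedule = [(k0, s0, -1)]
--     for t in sorted(delta):
--         d = delta[t]
--         if d != 0:
--             rooms += d
--             k, s, _ = schedule[-1]
--             schedule[-1] = (k, s, t)
--             if t != largest_end:
--                 schedule.append((rooms, t, -1))
--     return tuple(schedule)
-- ===== Notes on version B (the rewrite author's own statement) =====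
-- stated objective: simpler
-- what changed: A run-length-encodes the sorted start and end lists and merges them with a two-pointer while-loop over indices; B instead builds one dict of net room-count deltas per time and does a single sweep over its sorted keys.
import Mathlib
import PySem

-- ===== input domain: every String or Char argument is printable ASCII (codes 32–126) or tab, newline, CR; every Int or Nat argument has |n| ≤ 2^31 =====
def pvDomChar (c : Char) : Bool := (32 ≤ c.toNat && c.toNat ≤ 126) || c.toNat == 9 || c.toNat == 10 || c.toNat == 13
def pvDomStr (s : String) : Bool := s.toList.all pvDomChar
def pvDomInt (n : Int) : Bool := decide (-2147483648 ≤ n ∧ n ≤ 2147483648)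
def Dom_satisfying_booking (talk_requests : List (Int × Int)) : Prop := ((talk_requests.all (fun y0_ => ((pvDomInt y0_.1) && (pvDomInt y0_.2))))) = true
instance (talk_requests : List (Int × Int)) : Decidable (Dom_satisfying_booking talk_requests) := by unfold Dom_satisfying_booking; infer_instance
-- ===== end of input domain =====

-- B replaces A's run-length-encoding of two sorted lists plus a two-pointer merge by one
-- net-delta dict and a single sweep over its sorted keys (objective: simpler; return value only).

-- ===== PORT A =====
-- Item (value, count) is ported as Int × Int; Booking as (start, end, n_rooms) : Int × Int × Int.

-- get_counts: the for-loop mutating counts[-1] is ported with the schedule kept reversed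
-- (head = last element), reversed back when the loop ends.
def pvGetCountsGo : List Int → List (Int × Int) → List (Int × Int)
  | [], acc => acc.reverse
  | _ :: t, [] => pvGetCountsGo t []      -- unreachable: the accumulator is never empty
  | n :: t, (v, c) :: accT =>
    if n ≠ v then pvGetCountsGo t ((n, 1) :: (v, c) :: accT)
    else pvGetCountsGo t ((v, c + 1) :: accT)

def pvGetCounts : List Int → List (Int × Int)
  | [] => []
  | x :: rest => pvGetCountsGo rest [(x, 1)]

def pvNegateCounts (l : List (Int × Int)) : List (Int × Int) := l.map (fun p => (p.1, -p.2))

-- the body of `if d != 0:` in A's while loop (schedule reversed: head = schedule[-1])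
def pvApply (largestEnd : Int) (sched : List (Int × Int × Int)) (nextChange d : Int) :
    List (Int × Int × Int) :=
  if d ≠ 0 then
    match sched with
    | (st, _, k) :: rest =>
      if nextChange ≠ largestEnd then (nextChange, -1, k + d) :: (st, nextChange, k) :: rest
      else (st, nextChange, k) :: rest
    | [] => []                           -- unreachable: schedule is never empty
  else sched

-- A's while loop; the two indices s, e are the two remaining suffixes.  The loop is fueled:
-- where Python reads end_time_counts[e] past the end (IndexError, outside Pre_) we bail out,
-- and Python's non-terminating sentinel case (impossible: every end value < sentinel) is fuel 0.
def pvLoopA (largestEnd : Int) :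
    Nat → List (Int × Int) → List (Int × Int) → List (Int × Int × Int) → List (Int × Int × Int)
  | 0, _, _, sched => sched
  | _ + 1, _, [], sched => sched
  | fuel + 1, scRem, (ev, ecnt) :: ecT, sched =>
    let ns : Int × Int := scRem.headD (largestEnd + 1, 0)
    if ns.1 = ev then
      pvLoopA largestEnd fuel scRem.tail ecT (pvApply largestEnd sched (min ns.1 ev) (ns.2 + ecnt))
    else if ns.1 < ev then
      pvLoopA largestEnd fuel scRem.tail ((ev, ecnt) :: ecT) (pvApply largestEnd sched (min ns.1 ev) ns.2)
    else
      pvLoopA largestEnd fuel scRem ecT (pvApply largestEnd sched (min ns.1 ev) ecnt)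

def satisfying_booking (talk_requests : List (Int × Int)) : List (Int × Int × Int) :=
  match talk_requests with
  | [] => []
  | _ :: _ =>
    let startTimes := talk_requests.map (fun p => p.1)
    let endTimes := talk_requests.map (fun p => p.2)
    let sc := pvGetCounts (PySem.List.sorted startTimes (fun x => x) false)
    let ec := pvNegateCounts (pvGetCounts (PySem.List.sorted endTimes (fun x => x) false))
    match PySem.List.pyGet? ec (-1), sc with
    | some lastE, (v0, c0) :: scT =>
      let largestEnd := lastE.1
      let schedRev := pvLoopA largestEnd (scT.length + ec.length) scT ec [(v0, -1, c0)]
      (schedRev.reverse).map (fun b => (b.2.2, b.1, b.2.1))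
    | _, _ => []                         -- unreachable: both lists are nonempty here

-- ===== PORT B =====
-- the body of B's `for t in sorted(delta)` loop; state = (rooms, reversed schedule)
def pvStepB (largestEnd : Int) (st : Int × List (Int × Int × Int)) (p : Int × Int) :
    Int × List (Int × Int × Int) :=
  if p.2 ≠ 0 then
    let rooms := st.1 + p.2
    match st.2 with
    | b :: rest =>
      -- b = (k, s, _): schedule[-1] becomes (k, s, t), then maybe a new segment opens
      (rooms, if p.1 ≠ largestEnd then (rooms, p.1, -1) :: (b.1, b.2.1, p.1) :: rest
              else (b.1, b.2.1, p.1) :: rest)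
    | [] => (rooms, [])                  -- unreachable: schedule is never empty
  else st

def satisfying_booking_alt (talk_requests : List (Int × Int)) : List (Int × Int × Int) :=
  if talk_requests = [] then []
  else
    let starts := talk_requests.map (fun p => p.1)
    let ends := talk_requests.map (fun p => p.2)
    match PySem.List.min? starts (fun x => x) with
    | none => []                         -- unreachable: the list is nonempty here
    | some s0 =>
    match PySem.List.max? ends (fun x => x) with
    | none => []                         -- unreachable: the list is nonempty here
    | some largestEnd =>
      let k0 : Int := (PySem.List.count starts s0 : Int)
      let d1 := starts.foldl
        (fun d t => if t ≠ s0 then d.insert t (d.getD t 0 + 1) else d)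
        (PySem.Dict.empty : PySem.Dict Int Int)
      let d2 := ends.foldl (fun d t => d.insert t (d.getD t 0 - 1)) d1
      let times := PySem.List.sorted d2.keys (fun x => x) false
      let fin := times.foldl (fun st t => pvStepB largestEnd st (t, d2.getD t 0))
        (k0, [(k0, s0, -1)])
      fin.2.reverse

-- ===== PRECONDITION & SPEC =====
-- Pre_ excludes exactly the inputs on which A raises IndexError (it reads end_time_counts[e]
-- with e = len): a nonempty request list whose starts are not all equal and in which some
-- start time exceeds every end time.
def Pre_satisfying_booking (talk_requests : List (Int × Int)) : Prop :=
  talk_requests = [] ∨ (∀ p ∈ talk_requests, ∃ q ∈ talk_requests, p.1 ≤ q.2) ∨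
    (∀ p ∈ talk_requests, p.1 = (talk_requests.headD (0, 0)).1)
instance (talk_requests : List (Int × Int)) : Decidable (Pre_satisfying_booking talk_requests) := by
  unfold Pre_satisfying_booking; infer_instance

def pvWitness_satisfying_booking : (List (Int × Int)) := [(0, 2), (1, 3)]

def Spec_satisfying_booking (talk_requests : List (Int × Int)) (out : List (Int × Int × Int)) : Prop :=
  out = satisfying_booking_alt talk_requests
instance (talk_requests : List (Int × Int)) (out : List (Int × Int × Int)) :
    Decidable (Spec_satisfying_booking talk_requests out) := by
  unfold Spec_satisfying_booking; infer_instance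

-- ===== CLAIM (what is proved, stated in full; the proofs are below) =====
def Claim_equal_satisfying_booking : Prop :=
  ∀ (talk_requests : List (Int × Int)), Dom_satisfying_booking talk_requests →
    Pre_satisfying_booking talk_requests →
    Spec_satisfying_booking talk_requests (satisfying_booking talk_requests)

-- ===== LEMMAS AND PROOFS =====

-- run-length encoding of a list, by clean structural recursion (the specification of get_counts)
def pvRle : List Int → List (Int × Int)
  | [] => []
  | x :: t =>
    (x, 1 + ((t.takeWhile (fun y => y == x)).length : Int)) :: pvRle (t.dropWhile (fun y => y == x))
  termination_by l => l.length
  decreasing_by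
    simpa using Nat.lt_succ_of_le (List.length_dropWhile_le _ t)

-- merge of two key lists / (key, value) lists, mirroring A's two-pointer walk
def pvMergeKeys : List Int → List Int → List Int
  | _, [] => []
  | [], q :: Q => q :: pvMergeKeys [] Q
  | p :: P, q :: Q =>
    if p = q then p :: pvMergeKeys P Q
    else if p < q then p :: pvMergeKeys P (q :: Q)
    else q :: pvMergeKeys (p :: P) Q
  termination_by P Q => P.length + Q.length

def pvMergeEv : List (Int × Int) → List (Int × Int) → List (Int × Int)
  | _, [] => []
  | [], e :: E => e :: pvMergeEv [] E
  | s :: S, e :: E =>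
    if s.1 = e.1 then (s.1, s.2 + e.2) :: pvMergeEv S E
    else if s.1 < e.1 then s :: pvMergeEv S (e :: E)
    else e :: pvMergeEv (s :: S) E
  termination_by S E => S.length + E.length

def pvStepA (largestEnd : Int) (sched : List (Int × Int × Int)) (p : Int × Int) :
    List (Int × Int × Int) := pvApply largestEnd sched p.1 p.2

theorem pvGetCountsGo_eq (t : List Int) : ∀ (v c : Int) (accT : List (Int × Int)),
    pvGetCountsGo t ((v, c) :: accT) =
      accT.reverse ++ (v, c + ((t.takeWhile (fun y => y == v)).length : Int)) ::
        pvRle (t.dropWhile (fun y => y == v)) := by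
  induction t with
  | nil => intro v c accT; simp [pvGetCountsGo, pvRle]
  | cons n t ih =>
    intro v c accT
    by_cases h : n = v
    · subst h
      simp only [pvGetCountsGo]
      rw [if_neg (by omega), ih, List.takeWhile_cons_of_pos (by simp),
        List.dropWhile_cons_of_pos (by simp)]
      simp only [List.length_cons]
      have : ((((List.takeWhile (fun y => y == n) t).length + 1 : Nat)) : Int)
          = 1 + ((List.takeWhile (fun y => y == n) t).length : Int) := by push_cast; ring
      rw [this]
      rw [add_assoc]
    · simp only [pvGetCountsGo]
      rw [if_pos (by simpa using h), ih,
        List.takeWhile_cons_of_neg (by simpa using h),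
        List.dropWhile_cons_of_neg (by simpa using h)]
      rw [pvRle]
      simp

theorem pvGetCounts_eq_rle (l : List Int) : pvGetCounts l = pvRle l := by
  cases l with
  | nil => simp [pvGetCounts, pvRle]
  | cons x rest =>
    show pvGetCountsGo rest [(x, 1)] = _
    rw [pvGetCountsGo_eq, pvRle]
    simp

theorem pvRle_key_mem : ∀ (m : List Int) (p : Int × Int), p ∈ pvRle m → p.1 ∈ m := by
  intro m
  induction m using pvRle.induct with
  | case1 => simp [pvRle]
  | case2 x t ih =>
    intro p hp
    rw [pvRle] at hp
    rcases List.mem_cons.1 hp with h | h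
    · subst h; simp
    · exact List.mem_cons_of_mem _ ((t.dropWhile_sublist _).mem (ih p h))

theorem pvTakeWhile_count (x : Int) : ∀ (t : List Int), t.Pairwise (· ≤ ·) → (∀ y ∈ t, x ≤ y) →
    (t.takeWhile (fun y => y == x)).length = t.count x := by
  intro t
  induction t with
  | nil => simp
  | cons y t ih =>
    intro hp hle
    by_cases h : y = x
    · subst h
      rw [List.takeWhile_cons_of_pos (by simp), List.count_cons_self]
      simp only [List.length_cons]
      rw [ih (List.Pairwise.of_cons hp) (fun z hz => hle z (List.mem_cons_of_mem _ hz))]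
    · rw [List.takeWhile_cons_of_neg (by simpa using h)]
      simp only [List.length_nil, List.count_cons]
      rw [if_neg (by simpa using h)]
      have : t.count x = 0 := by
        rw [List.count_eq_zero]
        intro hx
        have h1 := hle y (by simp)
        have h2 := (List.pairwise_cons.1 hp).1 x hx
        omega
      omega

theorem pvDropWhile_gt (x : Int) : ∀ (t : List Int), t.Pairwise (· ≤ ·) → (∀ y ∈ t, x ≤ y) →
    ∀ z ∈ t.dropWhile (fun y => y == x), x < z := by
  intro t
  induction t with
  | nil => simp
  | cons y t ih =>
    intro hp hle z hz
    by_cases h : y = x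
    · subst h
      rw [List.dropWhile_cons_of_pos (by simp)] at hz
      exact ih (List.Pairwise.of_cons hp) (fun w hw => hle w (List.mem_cons_of_mem _ hw)) z hz
    · rw [List.dropWhile_cons_of_neg (by simpa using h)] at hz
      have hyx : x < y := lt_of_le_of_ne (hle y (by simp)) (Ne.symm h)
      rcases List.mem_cons.1 hz with h2 | h2
      · omega
      · exact lt_of_lt_of_le hyx ((List.pairwise_cons.1 hp).1 z h2)

theorem pvRle_count : ∀ (l : List Int), l.Pairwise (· ≤ ·) →
    ∀ p ∈ pvRle l, p.2 = (l.count p.1 : Int) := by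
  intro l
  induction l using pvRle.induct with
  | case1 => simp [pvRle]
  | case2 x t ih =>
    intro hp p hmem
    have hpt : t.Pairwise (· ≤ ·) := List.Pairwise.of_cons hp
    have hle : ∀ y ∈ t, x ≤ y := (List.pairwise_cons.1 hp).1
    rw [pvRle] at hmem
    rcases List.mem_cons.1 hmem with h | h
    · subst h
      simp only [List.count_cons_self]
      rw [pvTakeWhile_count x t hpt hle]
      push_cast
      ring
    · have hdp : (t.dropWhile (fun y => y == x)).Pairwise (· ≤ ·) :=
        hpt.sublist (t.dropWhile_sublist _)
      rw [ih hdp p h]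
      have hk : p.1 ∈ t.dropWhile (fun y => y == x) := pvRle_key_mem _ p h
      have hgt : x < p.1 := pvDropWhile_gt x t hpt hle p.1 hk
      congr 1
      conv_rhs => rw [← t.takeWhile_append_dropWhile (p := (fun y => y == x))]
      simp only [List.count_cons, List.count_append, beq_iff_eq,
        if_neg (show ¬ x = p.1 by omega)]
      have : (t.takeWhile (fun y => y == x)).count p.1 = 0 := by
        rw [List.count_eq_zero]
        intro hc
        have := List.mem_takeWhile_imp hc
        simp at this
        omega
      omega

theorem pvRle_keys_pairwise : ∀ (l : List Int), l.Pairwise (· ≤ ·) →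
    ((pvRle l).map Prod.fst).Pairwise (· < ·) := by
  intro l
  induction l using pvRle.induct with
  | case1 => simp [pvRle]
  | case2 x t ih =>
    intro hp
    have hpt : t.Pairwise (· ≤ ·) := List.Pairwise.of_cons hp
    have hle : ∀ y ∈ t, x ≤ y := (List.pairwise_cons.1 hp).1
    have hdp : (t.dropWhile (fun y => y == x)).Pairwise (· ≤ ·) :=
      hpt.sublist (t.dropWhile_sublist _)
    rw [pvRle]
    simp only [List.map_cons, List.pairwise_cons]
    refine ⟨?_, ih hdp⟩
    intro z hz
    rcases List.mem_map.1 hz with ⟨p, hpm, hpe⟩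
    subst hpe
    exact pvDropWhile_gt x t hpt hle p.1 (pvRle_key_mem _ p hpm)

theorem pvRle_keys_mem : ∀ (l : List Int) (z : Int), z ∈ (pvRle l).map Prod.fst ↔ z ∈ l := by
  intro l
  induction l using pvRle.induct with
  | case1 => simp [pvRle]
  | case2 x t ih =>
    intro z
    rw [pvRle]
    simp only [List.map_cons, List.mem_cons]
    constructor
    · rintro (h | h)
      · exact Or.inl h
      · exact Or.inr ((t.dropWhile_sublist _).mem ((ih z).1 h))
    · rintro (h | h)
      · exact Or.inl h
      · by_cases hzx : z = x
        · exact Or.inl hzx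
        · refine Or.inr ((ih z).2 ?_)
          conv at h => rw [← t.takeWhile_append_dropWhile (p := (fun y => y == x))]
          rcases List.mem_append.1 h with h2 | h2
          · have := List.mem_takeWhile_imp h2
            simp at this
            exact absurd this hzx
          · exact h2

theorem pvMergeKeys_mem : ∀ (P Q : List Int), P.Pairwise (· < ·) → Q.Pairwise (· < ·) →
    (∀ x ∈ P, ∃ y ∈ Q, x ≤ y) → ∀ t, (t ∈ pvMergeKeys P Q ↔ t ∈ P ∨ t ∈ Q) := by
  intro P Q
  induction P, Q using pvMergeKeys.induct with
  | case1 P =>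
    intro _ _ hPQ t
    rw [pvMergeKeys]
    constructor
    · intro h; simp at h
    · rintro (h | h)
      · rcases hPQ t h with ⟨y, hy, _⟩; simp at hy
      · simp at h
  | case2 q Q ih =>
    intro hP hQ hPQ t
    rw [pvMergeKeys]
    have := ih hP (List.Pairwise.of_cons hQ) (by simp) t
    simp only [List.mem_cons, this]
    tauto
  | case3 P q Q ih =>
    intro hP hQ hPQ t
    rw [pvMergeKeys, if_pos rfl]
    have hrec := ih (List.Pairwise.of_cons hP) (List.Pairwise.of_cons hQ) ?hh t
    · simp only [List.mem_cons, hrec]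
      tauto
    case hh =>
      intro x hx
      rcases hPQ x (List.mem_cons_of_mem _ hx) with ⟨y, hy, hxy⟩
      rcases List.mem_cons.1 hy with h1 | h1
      · exfalso
        have := (List.pairwise_cons.1 hP).1 x hx
        omega
      · exact ⟨y, h1, hxy⟩
  | case4 p P q Q hne hlt ih =>
    intro hP hQ hPQ t
    rw [pvMergeKeys, if_neg hne, if_pos hlt]
    have hrec := ih (List.Pairwise.of_cons hP) hQ
      (fun x hx => hPQ x (List.mem_cons_of_mem _ hx)) t
    simp only [List.mem_cons, hrec]
    tauto
  | case5 p P q Q hne hnlt ih =>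
    intro hP hQ hPQ t
    rw [pvMergeKeys, if_neg hne, if_neg hnlt]
    have hrec := ih hP (List.Pairwise.of_cons hQ) ?hh t
    · simp only [List.mem_cons, hrec]
      tauto
    case hh =>
      intro x hx
      rcases hPQ x hx with ⟨y, hy, hxy⟩
      rcases List.mem_cons.1 hy with h1 | h1
      · exfalso
        rcases List.mem_cons.1 hx with h2 | h2
        · omega
        · have := (List.pairwise_cons.1 hP).1 x h2
          omega
      · exact ⟨y, h1, hxy⟩

theorem pvMergeKeys_mem_sub : ∀ (P Q : List Int) (t : Int),
    t ∈ pvMergeKeys P Q → t ∈ P ∨ t ∈ Q := by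
  intro P Q
  induction P, Q using pvMergeKeys.induct with
  | case1 P => intro t h; rw [pvMergeKeys] at h; simp at h
  | case2 q Q ih =>
    intro t h
    rw [pvMergeKeys] at h
    rcases List.mem_cons.1 h with h | h
    · subst h; simp
    · rcases ih t h with h | h
      · simp at h
      · simp [h]
  | case3 P q Q ih =>
    intro t h
    rw [pvMergeKeys, if_pos rfl] at h
    rcases List.mem_cons.1 h with h | h
    · subst h; simp
    · rcases ih t h with h | h <;> simp [h]
  | case4 p P q Q hne hlt ih =>
    intro t h
    rw [pvMergeKeys, if_neg hne, if_pos hlt] at h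
    rcases List.mem_cons.1 h with h | h
    · subst h; simp
    · rcases ih t h with h | h <;> simp [h]
  | case5 p P q Q hne hnlt ih =>
    intro t h
    rw [pvMergeKeys, if_neg hne, if_neg hnlt] at h
    rcases List.mem_cons.1 h with h | h
    · subst h; simp
    · rcases ih t h with h | h <;> simp [h, List.mem_cons]

theorem pvMergeKeys_pairwise : ∀ (P Q : List Int), P.Pairwise (· < ·) → Q.Pairwise (· < ·) →
    (pvMergeKeys P Q).Pairwise (· < ·) := by
  intro P Q
  induction P, Q using pvMergeKeys.induct with
  | case1 P => intro _ _; rw [pvMergeKeys]; exact List.Pairwise.nil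
  | case2 q Q ih =>
    intro hP hQ
    rw [pvMergeKeys]
    refine List.pairwise_cons.2 ⟨?_, ih hP (List.Pairwise.of_cons hQ)⟩
    intro t ht
    rcases pvMergeKeys_mem_sub _ _ t ht with h | h
    · simp at h
    · exact (List.pairwise_cons.1 hQ).1 t h
  | case3 P q Q ih =>
    intro hP hQ
    rw [pvMergeKeys, if_pos rfl]
    refine List.pairwise_cons.2 ⟨?_, ih (List.Pairwise.of_cons hP) (List.Pairwise.of_cons hQ)⟩
    intro t ht
    rcases pvMergeKeys_mem_sub _ _ t ht with h | h
    · exact (List.pairwise_cons.1 hP).1 t h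
    · exact (List.pairwise_cons.1 hQ).1 t h
  | case4 p P q Q hne hlt ih =>
    intro hP hQ
    rw [pvMergeKeys, if_neg hne, if_pos hlt]
    refine List.pairwise_cons.2 ⟨?_, ih (List.Pairwise.of_cons hP) hQ⟩
    intro t ht
    rcases pvMergeKeys_mem_sub _ _ t ht with h | h
    · exact (List.pairwise_cons.1 hP).1 t h
    · rcases List.mem_cons.1 h with h | h
      · omega
      · have := (List.pairwise_cons.1 hQ).1 t h
        omega
  | case5 p P q Q hne hnlt ih =>
    intro hP hQ
    rw [pvMergeKeys, if_neg hne, if_neg hnlt]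
    refine List.pairwise_cons.2 ⟨?_, ih hP (List.Pairwise.of_cons hQ)⟩
    intro t ht
    rcases pvMergeKeys_mem_sub _ _ t ht with h | h
    · rcases List.mem_cons.1 h with h | h
      · omega
      · have := (List.pairwise_cons.1 hP).1 t h
        omega
    · exact (List.pairwise_cons.1 hQ).1 t h

theorem pvMergeEv_map (vP vQ : Int → Int) : ∀ (P Q : List Int),
    P.Pairwise (· < ·) → Q.Pairwise (· < ·) →
    pvMergeEv (P.map (fun v => (v, vP v))) (Q.map (fun v => (v, vQ v))) =
      (pvMergeKeys P Q).map
        (fun t => (t, (if t ∈ P then vP t else 0) + (if t ∈ Q then vQ t else 0))) := by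
  intro P Q
  induction P, Q using pvMergeKeys.induct with
  | case1 P =>
    intro _ _
    rw [pvMergeKeys]
    simp only [List.map_nil]
    rw [pvMergeEv.eq_def]
  | case2 q Q ih =>
    intro hP hQ
    simp only [List.map_nil, List.map_cons] at *
    rw [pvMergeEv, pvMergeKeys]
    rw [ih List.Pairwise.nil (List.Pairwise.of_cons hQ)]
    refine List.cons_eq_cons.mpr ⟨by simp, List.map_congr_left ?_⟩
    intro t ht
    rcases pvMergeKeys_mem_sub _ _ t ht with h | h
    · simp at h
    · have htq : t ≠ q := by
        have := (List.pairwise_cons.1 hQ).1 t h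
        omega
      simp [htq]
  | case3 P q Q ih =>
    intro hP hQ
    simp only [List.map_cons]
    rw [pvMergeEv, pvMergeKeys]
    rw [if_pos rfl, if_pos rfl, ih (List.Pairwise.of_cons hP) (List.Pairwise.of_cons hQ)]
    refine List.cons_eq_cons.mpr ⟨by simp, List.map_congr_left ?_⟩
    intro t ht
    have htq : t ≠ q := by
      rcases pvMergeKeys_mem_sub _ _ t ht with h | h
      · have := (List.pairwise_cons.1 hP).1 t h; omega
      · have := (List.pairwise_cons.1 hQ).1 t h; omega
    simp [htq]
  | case4 p P q Q hne hlt ih =>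
    intro hP hQ
    simp only [List.map_cons]
    rw [pvMergeEv, pvMergeKeys]
    simp only [if_neg hne, if_pos hlt]
    simp only [List.map_cons] at ih
    rw [ih (List.Pairwise.of_cons hP) hQ]
    have hpq : p ∉ q :: Q := by
      intro h
      rcases List.mem_cons.1 h with h | h
      · omega
      · have := (List.pairwise_cons.1 hQ).1 p h
        omega
    refine List.cons_eq_cons.mpr ⟨by simp [hpq], List.map_congr_left ?_⟩
    intro t ht
    have htp : t ≠ p := by
      rcases pvMergeKeys_mem_sub _ _ t ht with h | h
      · have := (List.pairwise_cons.1 hP).1 t h; omega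
      · rcases List.mem_cons.1 h with h | h
        · omega
        · have := (List.pairwise_cons.1 hQ).1 t h; omega
    simp [htp]
  | case5 p P q Q hne hnlt ih =>
    intro hP hQ
    simp only [List.map_cons]
    rw [pvMergeEv, pvMergeKeys]
    simp only [if_neg hne, if_neg hnlt]
    simp only [List.map_cons] at ih
    rw [ih hP (List.Pairwise.of_cons hQ)]
    have hqp : q ∉ p :: P := by
      intro h
      rcases List.mem_cons.1 h with h | h
      · omega
      · have := (List.pairwise_cons.1 hP).1 q h
        omega
    refine List.cons_eq_cons.mpr ⟨by simp [hqp], List.map_congr_left ?_⟩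
    intro t ht
    have htq : t ≠ q := by
      rcases pvMergeKeys_mem_sub _ _ t ht with h | h
      · rcases List.mem_cons.1 h with h | h
        · omega
        · have := (List.pairwise_cons.1 hP).1 t h; omega
      · have := (List.pairwise_cons.1 hQ).1 t h; omega
    simp [htq]

theorem pvLoopA_eq_foldl (L : Int) : ∀ (fuel : Nat) (sc ec : List (Int × Int))
    (sched : List (Int × Int × Int)), sc.length + ec.length ≤ fuel →
    (∀ p ∈ ec, p.1 ≤ L) →
    pvLoopA L fuel sc ec sched = (pvMergeEv sc ec).foldl (pvStepA L) sched := by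
  intro fuel
  induction fuel with
  | zero =>
    intro sc ec sched hf _
    have hsc : sc = [] := by cases sc <;> simp_all
    have hec : ec = [] := by cases ec <;> simp_all
    subst hsc; subst hec
    rw [pvLoopA, pvMergeEv]
    rfl
  | succ fuel ih =>
    intro sc ec sched hf hle
    cases ec with
    | nil =>
      rw [pvLoopA, pvMergeEv.eq_def]
      cases sc <;> rfl
    | cons e ecT =>
      obtain ⟨ev, ecnt⟩ := e
      cases sc with
      | nil =>
        rw [pvLoopA]
        have h1 : ¬ (([] : List (Int × Int)).headD (L + 1, 0)).1 = ev := by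
          have := hle (ev, ecnt) (by simp)
          simp at this ⊢
          omega
        have h2 : ¬ (([] : List (Int × Int)).headD (L + 1, 0)).1 < ev := by
          have := hle (ev, ecnt) (by simp)
          simp at this ⊢
          omega
        rw [if_neg h1, if_neg h2]
        rw [pvMergeEv]
        rw [List.foldl_cons]
        have hmin : min (([] : List (Int × Int)).headD (L + 1, 0)).1 ev = ev := by
          have := hle (ev, ecnt) (by simp)
          simp at this ⊢
          omega
        rw [hmin]
        exact ih [] ecT _ (by simpa using Nat.le_of_succ_le_succ (by simpa using hf))
          (fun p hp => hle p (List.mem_cons_of_mem _ hp))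
      | cons s scT =>
        obtain ⟨sv, scnt⟩ := s
        rw [pvLoopA]
        simp only [List.headD_cons, List.tail_cons]
        by_cases h1 : sv = ev
        · rw [if_pos h1]
          rw [pvMergeEv, if_pos h1]
          rw [List.foldl_cons]
          have hmin : min (sv, scnt).1 ev = sv := by simp; omega
          subst h1
          simp only [min_self]
          exact ih scT ecT _ (by simp at hf ⊢; omega)
            (fun p hp => hle p (List.mem_cons_of_mem _ hp))
        · rw [if_neg h1]
          by_cases h2 : sv < ev
          · rw [if_pos h2, pvMergeEv, if_neg h1, if_pos h2, List.foldl_cons]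
            have hmin : min sv ev = sv := by omega
            simp only [hmin]
            exact ih scT ((ev, ecnt) :: ecT) _ (by simp at hf ⊢; omega) hle
          · rw [if_neg h2, pvMergeEv, if_neg h1, if_neg h2, List.foldl_cons]
            have hmin : min sv ev = ev := by omega
            simp only [hmin]
            exact ih ((sv, scnt) :: scT) ecT _ (by simp at hf ⊢; omega)
              (fun p hp => hle p (List.mem_cons_of_mem _ hp))

theorem pvSweep_eq (L : Int) : ∀ (events : List (Int × Int)) (st e k : Int)
    (restA : List (Int × Int × Int)),
    (events.map Prod.fst).Pairwise (· < ·) → (∀ p ∈ events, p.1 ≤ L) →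
    ((events.foldl (pvStepA L) ((st, e, k) :: restA)).reverse.map (fun b => (b.2.2, b.1, b.2.1)))
      = ((events.foldl (pvStepB L) (k, (k, st, e) :: restA.map (fun b => (b.2.2, b.1, b.2.1)))).2).reverse := by
  intro events
  induction events with
  | nil =>
    intro st e k restA _ _
    simp
  | cons p rest ih =>
    intro st e k restA hpw hle
    obtain ⟨t, d⟩ := p
    rw [List.map_cons] at hpw
    have hpwT := List.Pairwise.of_cons hpw
    have hleT : ∀ q ∈ rest, q.1 ≤ L := fun q hq => hle q (List.mem_cons_of_mem _ hq)
    rw [List.foldl_cons, List.foldl_cons]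
    by_cases hd : d = 0
    · subst hd
      rw [show pvStepA L ((st, e, k) :: restA) (t, 0) = (st, e, k) :: restA by
        simp [pvStepA, pvApply]]
      rw [show pvStepB L (k, (k, st, e) :: restA.map (fun b => (b.2.2, b.1, b.2.1))) (t, 0)
          = (k, (k, st, e) :: restA.map (fun b => (b.2.2, b.1, b.2.1))) by simp [pvStepB]]
      exact ih st e k restA hpwT hleT
    · by_cases hL : t = L
      · -- the largest end time is the last event: rest must be empty
        have hrest : rest = [] := by
          cases rest with
          | nil => rfl
          | cons q qs =>
            exfalso
            have h1 : t < q.1 :=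
              (List.pairwise_cons.1 hpw).1 q.1 (by rw [List.map_cons]; simp)
            have h2 := hle q (by simp)
            omega
        subst hrest
        rw [show pvStepA L ((st, e, k) :: restA) (t, d)
            = (st, t, k) :: restA by simp [pvStepA, pvApply, hd, hL]]
        rw [show pvStepB L (k, (k, st, e) :: restA.map (fun b => (b.2.2, b.1, b.2.1))) (t, d)
            = (k + d, (k, st, t) :: restA.map (fun b => (b.2.2, b.1, b.2.1))) by
          simp [pvStepB, hd, hL]]
        simp only [List.foldl_nil]
        rw [List.map_reverse, List.map_cons]
      · rw [show pvStepA L ((st, e, k) :: restA) (t, d)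
            = (t, -1, k + d) :: (st, t, k) :: restA by simp [pvStepA, pvApply, hd, hL]]
        rw [show pvStepB L (k, (k, st, e) :: restA.map (fun b => (b.2.2, b.1, b.2.1))) (t, d)
            = (k + d, (k + d, t, -1) :: (k, st, t) :: restA.map (fun b => (b.2.2, b.1, b.2.1))) by
          simp [pvStepB, hd, hL]]
        have := ih t (-1) (k + d) ((st, t, k) :: restA) hpwT hleT
        simpa using this


-- every element of a strictly increasing list is bounded by its last element
theorem pvLe_getLast : ∀ (l : List Int) (h : l ≠ []), l.Pairwise (· < ·) →
    ∀ x ∈ l, x ≤ l.getLast h := by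
  intro l
  induction l with
  | nil => simp
  | cons a l ih =>
    intro _ hp x hx
    cases l with
    | nil => simp_all
    | cons b l' =>
      rw [List.getLast_cons (by simp)]
      rcases List.mem_cons.1 hx with h | h
      · subst h
        have hbm : (b :: l').getLast (by simp) ∈ b :: l' := List.getLast_mem _
        have := (List.pairwise_cons.1 hp).1 _ hbm
        omega
      · exact ih (by simp) (List.Pairwise.of_cons hp) x h

-- negative-one indexing is the last element
theorem pvPyGet_neg_one {α : Type} : ∀ (l : List α), l ≠ [] →
    PySem.List.pyGet? l (-1) = l.getLast? := by
  intro l h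
  cases l with
  | nil => simp_all
  | cons a t =>
    rw [show (-1 : Int) = -(1 : Nat) by simp]
    rw [PySem.List.pyGet?_neg_natCast _ _ (Nat.succ_le_succ (Nat.zero_le _))]
    · rw [List.getLast?_eq_getElem?]
    · exact Nat.succ_le_succ (Nat.zero_le _)

-- getD over B's first dict-building loop (the starts, skipping s0)
theorem pvD1_getD (s0 : Int) : ∀ (S : List Int) (d : PySem.Dict Int Int) (t : Int),
    (S.foldl (fun d x => if x ≠ s0 then d.insert x (d.getD x 0 + 1) else d) d).getD t 0 =
      d.getD t 0 + (if t = s0 then 0 else (S.count t : Int)) := by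
  intro S
  induction S with
  | nil => intro d t; simp
  | cons y S ih =>
    intro d t
    rw [List.foldl_cons]
    by_cases hy : y = s0
    · rw [if_neg (by simpa using hy), ih]
      simp only [List.count_cons, beq_iff_eq]
      by_cases h1 : t = s0
      · simp [h1]
      · rw [if_neg h1, if_neg h1, if_neg (show ¬ y = t by omega)]
        simp
    · rw [if_pos (by simpa using hy), ih]
      rw [PySem.Dict.getD_insert]
      simp only [List.count_cons, beq_iff_eq]
      rcases eq_or_ne t y with h1 | h1
      · rw [h1, if_pos rfl, if_neg hy, if_neg hy, if_pos rfl]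
        push_cast
        ring
      · rw [if_neg h1, if_neg (show ¬ y = t by omega)]
        by_cases h2 : t = s0
        · simp [h2]
        · rw [if_neg h2, if_neg h2]
          push_cast
          ring

-- getD over B's second dict-building loop (the ends)
theorem pvD2_getD : ∀ (E : List Int) (d : PySem.Dict Int Int) (t : Int),
    (E.foldl (fun d x => d.insert x (d.getD x 0 - 1)) d).getD t 0 =
      d.getD t 0 - (E.count t : Int) := by
  intro E
  induction E with
  | nil => intro d t; simp
  | cons y E ih =>
    intro d t
    rw [List.foldl_cons, ih, PySem.Dict.getD_insert]
    simp only [List.count_cons, beq_iff_eq]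
    rcases eq_or_ne t y with h1 | h1
    · rw [h1, if_pos rfl, if_pos rfl]
      push_cast
      ring
    · rw [if_neg h1, if_neg (show ¬ y = t by omega)]
      push_cast
      ring

theorem pvD1_keys (s0 : Int) : ∀ (S : List Int) (d : PySem.Dict Int Int) (t : Int),
    (t ∈ (S.foldl (fun d x => if x ≠ s0 then d.insert x (d.getD x 0 + 1) else d) d).keys ↔
      t ∈ d.keys ∨ (t ∈ S ∧ t ≠ s0)) := by
  intro S
  induction S with
  | nil => intro d t; simp
  | cons y S ih =>
    intro d t
    rw [List.foldl_cons]
    by_cases hy : y = s0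
    · rw [if_neg (by simpa using hy), ih]
      subst hy
      constructor
      · rintro (h | h) <;> simp_all
      · rintro (h | ⟨h1, h2⟩)
        · exact Or.inl h
        · rcases List.mem_cons.1 h1 with h | h
          · omega
          · exact Or.inr ⟨h, h2⟩
    · rw [if_pos (by simpa using hy), ih]
      rw [PySem.Dict.mem_keys_insert]
      constructor
      · rintro ((h | h) | h)
        · subst h; exact Or.inr ⟨by simp, hy⟩
        · exact Or.inl h
        · exact Or.inr ⟨List.mem_cons_of_mem _ h.1, h.2⟩
      · rintro (h | ⟨h1, h2⟩)
        · exact Or.inl (Or.inr h)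
        · rcases List.mem_cons.1 h1 with h | h
          · exact Or.inl (Or.inl h)
          · exact Or.inr ⟨h, h2⟩

theorem pvD2_keys : ∀ (E : List Int) (d : PySem.Dict Int Int) (t : Int),
    (t ∈ (E.foldl (fun d x => d.insert x (d.getD x 0 - 1)) d).keys ↔ t ∈ d.keys ∨ t ∈ E) := by
  intro E
  induction E with
  | nil => intro d t; simp
  | cons y E ih =>
    intro d t
    rw [List.foldl_cons, ih, PySem.Dict.mem_keys_insert]
    simp only [List.mem_cons]
    tauto

theorem pvD1_nodup (s0 : Int) : ∀ (S : List Int) (d : PySem.Dict Int Int), d.keys.Nodup →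
    (S.foldl (fun d x => if x ≠ s0 then d.insert x (d.getD x 0 + 1) else d) d).keys.Nodup := by
  intro S
  induction S with
  | nil => intro d h; exact h
  | cons y S ih =>
    intro d h
    rw [List.foldl_cons]
    by_cases hy : y = s0
    · rw [if_neg (by simpa using hy)]
      exact ih d h
    · rw [if_pos (by simpa using hy)]
      exact ih _ (PySem.Dict.nodup_keys_insert _ _ _ h)

-- the value of pvRle on a sorted list: its own keys, each with its multiplicity
theorem pvRle_eq_map (l : List Int) (h : l.Pairwise (· ≤ ·)) :
    pvRle l = ((pvRle l).map Prod.fst).map (fun v => (v, (l.count v : Int))) := by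
  rw [List.map_map]
  conv_lhs => rw [show pvRle l = (pvRle l).map id from (List.map_id _).symm]
  apply List.map_congr_left
  intro p hp
  have := pvRle_count l h p hp
  simp only [id, Function.comp_apply]
  rw [Prod.ext_iff]
  exact ⟨rfl, by simpa using this⟩


-- ===== VERDICT (by name: the statement is the Claim_ definition above) =====
theorem satisfying_booking_spec : Claim_equal_satisfying_booking := by
  unfold Claim_equal_satisfying_booking
  intro tr _ hPre
  unfold Spec_satisfying_booking
  cases tr with
  | nil => rfl
  | cons hd tl =>
    -- abbreviations
    have hne : hd :: tl ≠ [] := by simp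
    set S : List Int := (hd :: tl).map (fun p => p.1) with hS
    set E : List Int := (hd :: tl).map (fun p => p.2) with hE
    have hSne : S ≠ [] := by simp [hS]
    have hEne : E ≠ [] := by simp [hE]
    set Ss := PySem.List.sorted S (fun x => x) false with hSs
    set Es := PySem.List.sorted E (fun x => x) false with hEs
    have hSsne : Ss ≠ [] := by
      rw [hSs, Ne, PySem.List.sorted_eq_nil_iff]; exact hSne
    have hEsne : Es ≠ [] := by
      rw [hEs, Ne, PySem.List.sorted_eq_nil_iff]; exact hEne
    have hSspw : Ss.Pairwise (· ≤ ·) := PySem.List.sorted_pairwise S (fun x => x)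
    have hEspw : Es.Pairwise (· ≤ ·) := PySem.List.sorted_pairwise E (fun x => x)
    set Ks := (pvRle Ss).map Prod.fst with hKsdef
    set Ke := (pvRle Es).map Prod.fst with hKedef
    have hKspw : Ks.Pairwise (· < ·) := pvRle_keys_pairwise Ss hSspw
    have hKepw : Ke.Pairwise (· < ·) := pvRle_keys_pairwise Es hEspw
    have hKsmem : ∀ z, z ∈ Ks ↔ z ∈ S := by
      intro z; rw [hKsdef, pvRle_keys_mem, hSs, PySem.List.mem_sorted]
    have hKemem : ∀ z, z ∈ Ke ↔ z ∈ E := by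
      intro z; rw [hKedef, pvRle_keys_mem, hEs, PySem.List.mem_sorted]
    have hcountS : ∀ v, Ss.count v = S.count v := fun v =>
      (PySem.List.sorted_perm S (fun x => x) false).count_eq v
    have hcountE : ∀ v, Es.count v = E.count v := fun v =>
      (PySem.List.sorted_perm E (fun x => x) false).count_eq v
    have hsc : pvGetCounts Ss = Ks.map (fun v => (v, (S.count v : Int))) := by
      rw [pvGetCounts_eq_rle, pvRle_eq_map Ss hSspw, ← hKsdef]
      exact List.map_congr_left (fun v _ => by rw [hcountS])
    have hec : pvNegateCounts (pvGetCounts Es) = Ke.map (fun v => (v, -(E.count v : Int))) := by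
      rw [pvGetCounts_eq_rle, pvRle_eq_map Es hEspw, ← hKedef, pvNegateCounts, List.map_map]
      exact List.map_congr_left (fun v _ => by simp [hcountE])
    -- Ks and Ke are nonempty
    obtain ⟨s0, KsT, hKs⟩ : ∃ s0 KsT, Ks = s0 :: KsT := by
      rw [hKsdef]
      cases hx : Ss with
      | nil => exact absurd hx hSsne
      | cons x t => rw [pvRle]; exact ⟨x, _, rfl⟩
    have hKene : Ke ≠ [] := by
      rw [hKedef]
      cases hx : Es with
      | nil => exact absurd hx hEsne
      | cons x t => rw [pvRle]; simp
    set LL := Ke.getLast hKene with hLL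
    have hLLmem : LL ∈ Ke := List.getLast_mem hKene
    have hEle : ∀ y ∈ Ke, y ≤ LL := pvLe_getLast Ke hKene hKepw
    have hKsTpw : KsT.Pairwise (· < ·) := by
      rw [hKs] at hKspw; exact List.Pairwise.of_cons hKspw
    have hs0lt : ∀ x ∈ KsT, s0 < x := by
      rw [hKs] at hKspw; exact (List.pairwise_cons.1 hKspw).1
    have hKsTmem : ∀ t, t ∈ KsT ↔ (t ∈ S ∧ t ≠ s0) := by
      intro t
      constructor
      · intro h
        refine ⟨(hKsmem t).1 (by rw [hKs]; exact List.mem_cons_of_mem _ h), ?_⟩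
        have := hs0lt t h; omega
      · rintro ⟨h1, h2⟩
        have := (hKsmem t).2 h1
        rw [hKs] at this
        rcases List.mem_cons.1 this with h | h
        · exact absurd h h2
        · exact h
    -- bound on the non-initial start keys, from the precondition
    have hbound : ∀ x ∈ KsT, x ≤ LL := by
      rcases hPre with h | h | h
      · exact absurd h hne
      · intro x hx
        obtain ⟨hxS, _⟩ := (hKsTmem x).1 hx
        obtain ⟨p, hp, hpx⟩ := List.mem_map.1 hxS
        obtain ⟨q, hq, hle⟩ := h p hp
        have : q.2 ≤ LL := hEle q.2 ((hKemem q.2).2 (by rw [hE]; exact List.mem_map_of_mem hq))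
        omega
      · intro x hx
        exfalso
        obtain ⟨hxS, hxne⟩ := (hKsTmem x).1 hx
        have hs0S : s0 ∈ S := (hKsmem s0).1 (by rw [hKs]; simp)
        obtain ⟨p, hp, hpx⟩ := List.mem_map.1 hxS
        obtain ⟨p', hp', hpx'⟩ := List.mem_map.1 hs0S
        have e1 := h p hp
        have e2 := h p' hp'
        rw [hpx] at e1
        rw [hpx'] at e2
        omega
    have hPQ : ∀ x ∈ KsT, ∃ y ∈ Ke, x ≤ y := fun x hx => ⟨LL, hLLmem, hbound x hx⟩
    have hs0S : s0 ∈ S := (hKsmem s0).1 (by rw [hKs]; simp)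
    have hles0 : ∀ y ∈ S, s0 ≤ y := by
      intro y hy
      have := (hKsmem y).2 hy
      rw [hKs] at this
      rcases List.mem_cons.1 this with h | h
      · omega
      · have := hs0lt y h; omega
    have hmin : PySem.List.min? S (fun x => x) = some s0 := by
      cases hm : PySem.List.min? S (fun x => x) with
      | none => rw [PySem.List.min?_eq_none_iff] at hm; exact absurd hm hSne
      | some m =>
        have hmS : m ∈ S := PySem.List.min?_mem hm
        have hmle : ∀ y ∈ S, m ≤ y := PySem.List.min?_isMin hm
        have : m = s0 := le_antisymm (hmle s0 hs0S) (hles0 m hmS)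
        rw [this]
    have hLLE : LL ∈ E := (hKemem LL).1 hLLmem
    have hleLL : ∀ y ∈ E, y ≤ LL := fun y hy => hEle y ((hKemem y).2 hy)
    have hmax : PySem.List.max? E (fun x => x) = some LL := by
      cases hm : PySem.List.max? E (fun x => x) with
      | none => rw [PySem.List.max?_eq_none_iff] at hm; exact absurd hm hEne
      | some m =>
        have hmE : m ∈ E := PySem.List.max?_mem hm
        have hmge : ∀ y ∈ E, y ≤ m := PySem.List.max?_isMax hm
        have : m = LL := le_antisymm (hleLL m hmE) (hmge LL hLLE)
        rw [this]
    -- the common event list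
    set events := (pvMergeKeys KsT Ke).map
      (fun t => (t, (if t ∈ KsT then (S.count t : Int) else 0) +
        (if t ∈ Ke then -(E.count t : Int) else 0))) with hevents
    have heventsfst : events.map Prod.fst = pvMergeKeys KsT Ke := by
      rw [hevents, List.map_map]
      exact (List.map_congr_left (fun t _ => rfl)).trans (List.map_id _)
    have hevpw : (events.map Prod.fst).Pairwise (· < ·) := by
      rw [heventsfst]; exact pvMergeKeys_pairwise KsT Ke hKsTpw hKepw
    have hevle : ∀ p ∈ events, p.1 ≤ LL := by
      intro p hp
      rw [hevents] at hp
      obtain ⟨t, ht, rfl⟩ := List.mem_map.1 hp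
      rcases pvMergeKeys_mem_sub _ _ t ht with h | h
      · exact hbound t h
      · exact hEle t h
    -- A reduces to the common sweep
    have hA : satisfying_booking (hd :: tl)
        = ((events.foldl (pvStepB LL)
            ((S.count s0 : Int), [((S.count s0 : Int), s0, -1)])).2).reverse := by
      rw [satisfying_booking]
      have hecne : Ke.map (fun v => (v, -(E.count v : Int))) ≠ [] := by
        intro hc; apply hKene; simpa using hc
      rw [← hE, ← hS, ← hEs, ← hSs, hec, hsc, hKs, List.map_cons]
      rw [pvPyGet_neg_one _ hecne, List.getLast?_map, List.getLast?_eq_some_getLast hKene]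
      simp only [Option.map_some]
      rw [← hLL]
      rw [pvLoopA_eq_foldl LL _ _ _ _ le_rfl (by
        intro p hp
        obtain ⟨v, hv, rfl⟩ := List.mem_map.1 hp
        exact hEle v hv)]
      rw [pvMergeEv_map _ _ KsT Ke hKsTpw hKepw, ← hevents]
      have := pvSweep_eq LL events s0 (-1) ((S.count s0 : Int)) [] hevpw hevle
      simpa using this
    -- B reduces to the same sweep
    have hB : satisfying_booking_alt (hd :: tl)
        = ((events.foldl (pvStepB LL)
            ((S.count s0 : Int), [((S.count s0 : Int), s0, -1)])).2).reverse := by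
      rw [satisfying_booking_alt, if_neg hne]
      rw [← hE, ← hS]
      dsimp only
      rw [hmin, hmax]
      dsimp only
      rw [PySem.List.count_eq]
      set d1 := S.foldl (fun d t => if t ≠ s0 then d.insert t (d.getD t 0 + 1) else d)
        (PySem.Dict.empty : PySem.Dict Int Int) with hd1
      set d2 := E.foldl (fun d t => d.insert t (d.getD t 0 - 1)) d1 with hd2
      have hnd1 : d1.keys.Nodup := by
        rw [hd1]
        exact pvD1_nodup s0 S PySem.Dict.empty PySem.Dict.nodup_keys_empty
      have hnd2 : d2.keys.Nodup := by
        rw [hd2]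
        exact PySem.Dict.nodup_keys_foldl_insert E _ d1 hnd1
      have hmergepw := pvMergeKeys_pairwise KsT Ke hKsTpw hKepw
      have hmnd : (pvMergeKeys KsT Ke).Nodup := hmergepw.imp (fun h => ne_of_lt h)
      have htimes : PySem.List.sorted d2.keys (fun x => x) false = pvMergeKeys KsT Ke := by
        apply PySem.List.sorted_eq_of_perm_of_pairwise_lt
        · refine (List.perm_ext_iff_of_nodup hmnd hnd2).2 ?_
          intro a
          rw [pvMergeKeys_mem KsT Ke hKsTpw hKepw hPQ, hKsTmem, hKemem]
          simp only [hd2, pvD2_keys, hd1, pvD1_keys, PySem.Dict.keys_empty, List.not_mem_nil,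
            false_or]
        · exact hmergepw
      rw [htimes]
      have hval : ∀ (acc : Int × List (Int × Int × Int)) (t : Int), t ∈ pvMergeKeys KsT Ke →
          pvStepB LL acc (t, d2.getD t 0) =
          pvStepB LL acc (t, (if t ∈ KsT then (S.count t : Int) else 0) +
            (if t ∈ Ke then -(E.count t : Int) else 0)) := by
        intro acc t ht
        congr 1
        rw [hd2, pvD2_getD, hd1, pvD1_getD]
        have h0 : (PySem.Dict.empty : PySem.Dict Int Int).getD t 0 = 0 := rfl
        rw [h0]
        have hE2 : (if t ∈ Ke then -(E.count t : Int) else 0) = -(E.count t : Int) := by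
          by_cases hk : t ∈ Ke
          · rw [if_pos hk]
          · rw [if_neg hk, List.count_eq_zero.2 (fun hc => hk ((hKemem t).2 hc))]
            simp
        rw [hE2]
        have hS2 : (if t = s0 then 0 else (S.count t : Int)) =
            (if t ∈ KsT then (S.count t : Int) else 0) := by
          by_cases hk : t ∈ KsT
          · rw [if_pos hk, if_neg ((hKsTmem t).1 hk).2]
          · rw [if_neg hk]
            by_cases hts : t = s0
            · rw [if_pos hts]
            · rw [if_neg hts, List.count_eq_zero.2 (fun hc => hk ((hKsTmem t).2 ⟨hc, hts⟩))]
              simp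
        rw [hS2]
        ring
      rw [PySem.List.foldl_congr_mem _ _ _ _ hval]
      rw [hevents, List.foldl_map]
    rw [hA, hB]
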